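-- pv_equiv track=rewrite | github.com/yihenghu317/demo_system | alpha_beta_core.py | get_max_alpha_beta
-- ===== SOURCE A (Python) =====
-- def get_max_alpha_beta(edges):
--     l_node = {}
--     r_node = {}
--     for e in edges:
--         if e[0] in l_node.keys():
--             l_node[e[0]] += 1
--         else:
--             l_node[e[0]] = 1
--
--         if e[1] in r_node.keys():
--             r_node[e[1]] += 1
--         else:
--             r_node[e[1]] = 1
--
--     return max(l_node.values()), max(r_node.values())
-- ===== SOURCE B (Python) =====
-- def _max_run(vals):
--     vals = sorted(vals)
--     runs = []
--     i = 0
--     while i < len(vals):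
--         j = i
--         while j < len(vals) and vals[j] == vals[i]:
--             j += 1
--         runs.append(j - i)
--         i = j
--     return max(runs)          # raises ValueError on empty input, like max({}.values())
--
--
-- def get_max_alpha_beta(edges):
--     return _max_run([e[0] for e in edges]), _max_run([e[1] for e in edges])
-- ===== Notes on version B (the rewrite author's own statement) =====
-- stated objective: alternative
-- what changed: Replaces the two membership-tested count dicts by sort-and-run-length counting: each side's max degree is the longest run of equal values in the sorted endpoint list.
import Mathlib
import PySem

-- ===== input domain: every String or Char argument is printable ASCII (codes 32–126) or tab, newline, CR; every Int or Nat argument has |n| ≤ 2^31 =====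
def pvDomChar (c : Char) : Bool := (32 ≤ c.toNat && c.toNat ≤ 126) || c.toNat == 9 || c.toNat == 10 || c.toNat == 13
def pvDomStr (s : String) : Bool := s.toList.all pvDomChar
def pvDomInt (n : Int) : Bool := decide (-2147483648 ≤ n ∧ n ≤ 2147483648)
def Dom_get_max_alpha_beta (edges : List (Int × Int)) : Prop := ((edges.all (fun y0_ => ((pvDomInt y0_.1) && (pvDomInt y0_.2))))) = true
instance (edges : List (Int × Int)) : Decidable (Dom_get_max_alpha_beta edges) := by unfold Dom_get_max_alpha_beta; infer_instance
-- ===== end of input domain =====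

-- B replaces A's two membership-tested count dicts by sorting each endpoint list and
-- taking the longest run of equal values (an alternative algorithm, not claimed faster).

-- ===== PORT A =====
-- one pass over edges, maintaining the two count dicts exactly as A does
def get_max_alpha_beta (edges : List (Int × Int)) : Int × Int :=
  let st := edges.foldl
    (fun (st : PySem.Dict Int Int × PySem.Dict Int Int) e =>
      let l := if st.1.contains e.1 then st.1.modify e.1 0 (· + 1) else st.1.insert e.1 1
      let r := if st.2.contains e.2 then st.2.modify e.2 0 (· + 1) else st.2.insert e.2 1
      (l, r))
    (PySem.Dict.empty, PySem.Dict.empty)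
  ((PySem.List.max? st.1.values (fun y => y)).getD 0,
   (PySem.List.max? st.2.values (fun y => y)).getD 0)

-- ===== PORT B =====
-- _max_run's inner while loop scans the maximal prefix of values equal to vals[i]
-- (takeWhile) and the outer loop resumes right after it (dropWhile); each run
-- contributes its length j - i = 1 + (length of the equal prefix of the tail).
def pvRunLengths (vals : List Int) : List Int :=
  match vals with
  | [] => []
  | v :: rest =>
      ((1 : Int) + (rest.takeWhile (· == v)).length) :: pvRunLengths (rest.dropWhile (· == v))
  termination_by vals.length
  decreasing_by
    simp only [List.length_cons]
    exact Nat.lt_succ_of_le (List.length_dropWhile_le _ _)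

-- max(runs): ValueError on an empty list is outside Pre_; .getD 0 is never reached inside Pre_
def pvMaxRun (vals : List Int) : Int :=
  (PySem.List.max? (pvRunLengths (PySem.List.sorted vals (fun x => x) false)) (fun y => y)).getD 0

def get_max_alpha_beta_alt (edges : List (Int × Int)) : Int × Int :=
  (pvMaxRun (edges.map (·.1)), pvMaxRun (edges.map (·.2)))

-- ===== PRECONDITION & SPEC =====
-- Pre_ excludes only the empty edge list, on which both A and B raise ValueError (max of an empty sequence).
def Pre_get_max_alpha_beta (edges : List (Int × Int)) : Prop := edges ≠ []
instance (edges : List (Int × Int)) : Decidable (Pre_get_max_alpha_beta edges) := by unfold Pre_get_max_alpha_beta; infer_instance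
def pvWitness_get_max_alpha_beta : (List (Int × Int)) := [(1, 2), (1, 3)]
def Spec_get_max_alpha_beta (edges : List (Int × Int)) (out : Int × Int) : Prop := out = get_max_alpha_beta_alt edges
instance (edges : List (Int × Int)) (out : Int × Int) : Decidable (Spec_get_max_alpha_beta edges out) := by unfold Spec_get_max_alpha_beta; infer_instance

-- ===== CLAIM =====
def Claim_equal_get_max_alpha_beta : Prop := ∀ (edges : List (Int × Int)), Dom_get_max_alpha_beta edges → Pre_get_max_alpha_beta edges → Spec_get_max_alpha_beta edges (get_max_alpha_beta edges)

-- ===== LEMMAS AND PROOFS =====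

-- max with the identity key is invariant under permutation
theorem pv_max?_perm (xs ys : List Int) (h : xs.Perm ys) :
    PySem.List.max? xs (fun y => y) = PySem.List.max? ys (fun y => y) := by
  cases hx : PySem.List.max? xs (fun y => y) with
  | none =>
      rw [PySem.List.max?_eq_none_iff] at hx
      subst hx
      rw [List.nil_perm] at h; subst h; rfl
  | some m =>
      cases hy : PySem.List.max? ys (fun y => y) with
      | none =>
          rw [PySem.List.max?_eq_none_iff] at hy
          subst hy
          rw [List.perm_nil] at h; subst h; simp [PySem.List.max?] at hx
      | some m' =>
          have hmx := PySem.List.max?_mem hx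
          have hmy := PySem.List.max?_mem hy
          have h1 := PySem.List.max?_isMax hx m' (h.mem_iff.mpr hmy)
          have h2 := PySem.List.max?_isMax hy m (h.mem_iff.mp hmx)
          simp only at h1 h2
          exact congrArg some (le_antisymm h2 h1)

-- A's membership-tested dict update is exactly the counter step
theorem pv_step_eq (d : PySem.Dict Int Int) (x : Int) :
    (if d.contains x then d.modify x 0 (· + 1) else d.insert x 1) = d.modify x 0 (· + 1) := by
  by_cases hc : d.contains x
  · simp [hc]
  · simp only [hc, if_neg, Bool.false_eq_true, not_false_iff]
    unfold PySem.Dict.modify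
    congr 1
    simp only [PySem.Dict.getD]
    rw [(PySem.Dict.get?_eq_none_iff_contains d x).mpr (by simpa using hc)]
    rfl

-- in a sorted list headed by v, nothing after the equal prefix equals v
theorem pv_not_mem_dropWhile (v : Int) (rest : List Int)
    (hp : rest.Pairwise (· ≤ ·)) (hle : ∀ y ∈ rest, v ≤ y) :
    v ∉ rest.dropWhile (· == v) := by
  induction rest with
  | nil => simp
  | cons x t ih =>
      by_cases hx : x = v
      · subst hx
        rw [List.dropWhile_cons_of_pos (by simp)]
        exact ih hp.of_cons (fun y hy => hle y (List.mem_cons_of_mem _ hy))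
      · rw [List.dropWhile_cons_of_neg (by simpa using hx)]
        have hvx : v < x := lt_of_le_of_ne (hle x (List.mem_cons_self)) (Ne.symm hx)
        intro hmem
        rcases List.mem_cons.mp hmem with h | h
        · exact hx h.symm
        · exact absurd (hvx.trans_le ((List.pairwise_cons.mp hp).1 v h)) (lt_irrefl v)

-- run lengths of a sorted list are a permutation of the counts of its distinct values
theorem pv_runLengths_perm (ss : List Int) (hs : ss.Pairwise (· ≤ ·)) :
    (pvRunLengths ss).Perm ((PySem.Set.ofList ss).map (fun v => (ss.count v : Int))) := by
  induction ss using pvRunLengths.induct with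
  | case1 => simp [pvRunLengths]
  | case2 v rest ih =>
      have hv : ∀ y ∈ rest, v ≤ y := fun y hy => (List.pairwise_cons.mp hs).1 y hy
      have hrest : rest.Pairwise (· ≤ ·) := (List.pairwise_cons.mp hs).2
      set same := rest.takeWhile (· == v) with hsame_def
      set other := rest.dropWhile (· == v) with hother_def
      have hrs : same ++ other = rest := List.takeWhile_append_dropWhile
      have hsame : ∀ y ∈ same, y = v := by
        intro y hy
        have := List.mem_takeWhile_imp hy
        simpa using this
      have hvo : v ∉ other := pv_not_mem_dropWhile v rest hrest hv
      have hop : other.Pairwise (· ≤ ·) := hrest.sublist (List.dropWhile_sublist _)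
      have IH := ih hop
      have hcount_v : ((v :: rest).count v : Int) = 1 + (same.length : Int) := by
        have h1 : rest.count v = same.count v + other.count v := by
          rw [← hrs, List.count_append]
        have h2 : same.count v = same.length := by
          rw [List.count_eq_length]
          intro b hb; exact (hsame b hb).symm
        have h3 : other.count v = 0 := List.count_eq_zero.mpr hvo
        rw [List.count_cons_self, h1, h2, h3]
        push_cast; ring
      have hcount_w : ∀ w ∈ PySem.Set.ofList other, ((v :: rest).count w : Int) = (other.count w : Int) := by
        intro w hw
        have hwo : w ∈ other := (PySem.Set.mem_ofList _ _).mp hw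
        have hwv : w ≠ v := fun h => hvo (h ▸ hwo)
        have h1 : (v :: rest).count w = rest.count w := by
          rw [List.count_cons_of_ne (Ne.symm hwv)]
        have h2 : same.count w = 0 := List.count_eq_zero.mpr (fun h => hwv (hsame w h))
        rw [h1, ← hrs, List.count_append, h2]; simp
      have hset : (PySem.Set.ofList (v :: rest)).Perm (v :: PySem.Set.ofList other) := by
        rw [List.perm_ext_iff_of_nodup (PySem.Set.nodup_ofList _)
          (by
            refine List.nodup_cons.mpr ⟨?_, PySem.Set.nodup_ofList _⟩
            simpa [PySem.Set.mem_ofList] using hvo)]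
        intro a
        simp only [PySem.Set.mem_ofList, List.mem_cons]
        constructor
        · rintro (rfl | ha)
          · exact Or.inl rfl
          · rw [← hrs] at ha
            rcases List.mem_append.mp ha with h | h
            · exact Or.inl (hsame a h)
            · exact Or.inr h
        · rintro (rfl | ha)
          · exact Or.inl rfl
          · exact Or.inr (by rw [← hrs]; exact List.mem_append_right _ ha)
      rw [pvRunLengths]
      refine List.Perm.trans ?_ ((hset.map (fun w => ((v :: rest).count w : Int))).symm)
      simp only [List.map_cons]
      rw [hcount_v, List.map_congr_left hcount_w]
      exact List.Perm.cons _ IH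

-- the values of A's counter dict are the counts of the distinct elements
theorem pv_values_counter (xs : List Int) :
    (PySem.Dict.counter xs).values = (PySem.Set.ofList xs).map (fun k => ((xs.count k : Int))) := by
  show ((PySem.Dict.counter xs).items).map (·.2) = _
  rw [PySem.Dict.items_counter]
  simp

theorem pv_ofList_sorted_perm (xs : List Int) :
    (PySem.Set.ofList (PySem.List.sorted xs (fun x => x) false)).Perm (PySem.Set.ofList xs) := by
  rw [List.perm_ext_iff_of_nodup (PySem.Set.nodup_ofList _) (PySem.Set.nodup_ofList _)]
  intro a
  rw [PySem.Set.mem_ofList, PySem.Set.mem_ofList, PySem.List.mem_sorted]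

-- B's run-length list is a permutation of A's counter values
theorem pv_values_perm (xs : List Int) :
    (pvRunLengths (PySem.List.sorted xs (fun x => x) false)).Perm ((PySem.Dict.counter xs).values) := by
  rw [pv_values_counter]
  refine (pv_runLengths_perm _ (PySem.List.sorted_pairwise ..)).trans ?_
  have hmc : (PySem.Set.ofList (PySem.List.sorted xs (fun x => x) false)).map
      (fun v => ((PySem.List.sorted xs (fun x => x) false).count v : Int)) =
      (PySem.Set.ofList (PySem.List.sorted xs (fun x => x) false)).map (fun v => (xs.count v : Int)) := by
    apply List.map_congr_left
    intro a _
    exact_mod_cast (PySem.List.sorted_perm xs (fun x => x) false).count_eq a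
  rw [hmc]
  exact (pv_ofList_sorted_perm xs).map _

-- the paired fold splits into two independent counter folds
theorem pv_fold_split_gen (edges : List (Int × Int)) (dl dr : PySem.Dict Int Int) :
    (edges.foldl
      (fun (st : PySem.Dict Int Int × PySem.Dict Int Int) e =>
        let l := if st.1.contains e.1 then st.1.modify e.1 0 (· + 1) else st.1.insert e.1 1
        let r := if st.2.contains e.2 then st.2.modify e.2 0 (· + 1) else st.2.insert e.2 1
        (l, r))
      (dl, dr)) =
    ((edges.map (·.1)).foldl (fun d x => d.modify x 0 (· + 1)) dl,
     (edges.map (·.2)).foldl (fun d x => d.modify x 0 (· + 1)) dr) := by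
  induction edges generalizing dl dr with
  | nil => rfl
  | cons e t ih =>
      rw [List.foldl_cons]
      show (t.foldl _ (if dl.contains e.1 then dl.modify e.1 0 (· + 1) else dl.insert e.1 1,
            if dr.contains e.2 then dr.modify e.2 0 (· + 1) else dr.insert e.2 1)) = _
      rw [pv_step_eq, pv_step_eq, ih]
      simp

theorem pv_fold_split (edges : List (Int × Int)) :
    (edges.foldl
      (fun (st : PySem.Dict Int Int × PySem.Dict Int Int) e =>
        let l := if st.1.contains e.1 then st.1.modify e.1 0 (· + 1) else st.1.insert e.1 1
        let r := if st.2.contains e.2 then st.2.modify e.2 0 (· + 1) else st.2.insert e.2 1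
        (l, r))
      (PySem.Dict.empty, PySem.Dict.empty)) =
    (PySem.Dict.counter (edges.map (·.1)), PySem.Dict.counter (edges.map (·.2))) := by
  rw [pv_fold_split_gen]
  rw [PySem.Dict.counter_eq_foldl, PySem.Dict.counter_eq_foldl]

-- ===== VERDICT =====
theorem get_max_alpha_beta_spec : Claim_equal_get_max_alpha_beta := by
  intro edges _ hpre
  unfold Spec_get_max_alpha_beta get_max_alpha_beta get_max_alpha_beta_alt pvMaxRun
  rw [pv_fold_split]
  rw [pv_max?_perm _ _ (pv_values_perm (edges.map (·.1))),
      pv_max?_perm _ _ (pv_values_perm (edges.map (·.2)))]
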